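-- pv_equiv track=rewrite | github.com/Ben-Edwards44/Advent-Of-Code | 2024/day21.py | get_all_num_paths
-- ===== SOURCE A (Python) =====
-- NUM_KEYPAD = (("7", "8", "9"),
--               ("4", "5", "6"),
--               ("1", "2", "3"),
--               (" ", "0", "A"))
--
-- def get_paths(start_key, end_key, keypad):
--     if start_key == end_key: return [""]
--
--     for i, x in enumerate(keypad):
--         for j, k in enumerate(x):
--             if k == start_key:
--                 start_x = i
--                 start_y = j
--             elif k == end_key:
--                 end_x = i
--                 end_y = j
--
--     all_paths = []
--     if start_x < end_x:
--         new_x = start_x + 1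
--         new_y = start_y
--
--         if keypad[new_x][new_y] != " ":
--             paths = get_paths(keypad[new_x][new_y], keypad[end_x][end_y], keypad)
--             all_paths += ["v" + i for i in paths]
--     elif start_x > end_x:
--         new_x = start_x - 1
--         new_y = start_y
--
--         if keypad[new_x][new_y] != " ":
--             paths = get_paths(keypad[new_x][new_y], keypad[end_x][end_y], keypad)
--             all_paths += ["^" + i for i in paths]
--
--     if start_y < end_y:
--         new_x = start_x
--         new_y = start_y + 1
--
--         if keypad[new_x][new_y] != " ":
--             paths = get_paths(keypad[new_x][new_y], keypad[end_x][end_y], keypad)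
--             all_paths += [">" + i for i in paths]
--     elif start_y > end_y:
--         new_x = start_x
--         new_y = start_y - 1
--
--         if keypad[new_x][new_y] != " ":
--             paths = get_paths(keypad[new_x][new_y], keypad[end_x][end_y], keypad)
--             all_paths += ["<" + i for i in paths]
--
--     return all_paths
--
-- def get_all_num_paths(num_code):
--     paths = [""]
--     prev = "A"
--     for num_key in num_code:
--         paths_to_key = get_paths(prev, num_key, NUM_KEYPAD)
--         prev = num_key
--
--         new_paths = []
--         for prev_paths in paths:
--             for add_path in paths_to_key:
--                 new_paths.append(prev_paths + add_path + "A")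
--
--         paths = [i for i in new_paths]
--
--     return paths
-- ===== SOURCE B (Python) =====
-- NUM_KEYPAD = (("7", "8", "9"),
--               ("4", "5", "6"),
--               ("1", "2", "3"),
--               (" ", "0", "A"))
--
-- def _pos(key):
--     for i, row in enumerate(NUM_KEYPAD):
--         for j, k in enumerate(row):
--             if k == key:
--                 return i, j
--     return None
--
-- def _interleave(a, b, ca, cb):
--     # all strings with a copies of ca and b copies of cb, ca-first (DFS) order
--     if a == 0 and b == 0:
--         return [""]
--     out = []
--     if a > 0:
--         out += [ca + s for s in _interleave(a - 1, b, ca, cb)]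
--     if b > 0:
--         out += [cb + s for s in _interleave(a, b - 1, ca, cb)]
--     return out
--
-- def _walk_ok(x, y, path):
--     for c in path:
--         if c == "v": x += 1
--         elif c == "^": x -= 1
--         elif c == ">": y += 1
--         else: y -= 1
--         if not (0 <= x < len(NUM_KEYPAD) and 0 <= y < len(NUM_KEYPAD[0])) or NUM_KEYPAD[x][y] == " ":
--             return False
--     return True
--
-- def _direct_paths(start_key, end_key):
--     if start_key == end_key:
--         return [""]
--     ps, pe = _pos(start_key), _pos(end_key)
--     if ps is None or pe is None:
--         return []
--     sx, sy = ps
--     ex, ey = pe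
--     dx, dy = ex - sx, ey - sy
--     vc = "v" if dx > 0 else "^"
--     hc = ">" if dy > 0 else "<"
--     return [p for p in _interleave(abs(dx), abs(dy), vc, hc) if _walk_ok(sx, sy, p)]
--
-- def get_all_num_paths(num_code):
--     paths = [""]
--     prev = "A"
--     for key in num_code:
--         segs = _direct_paths(prev, key)
--         paths = [p + s + "A" for p in paths for s in segs]
--         prev = key
--     return paths
-- ===== Notes on version B (the rewrite author's own statement) =====
-- stated objective: alternative
-- what changed: get_paths's cell-by-cell recursive DFS over the keypad (re-scanning the keypad for coordinates at every recursive step and pruning the blank during recursion) is replaced by a closed-form computation: find both key positions once, take dx/dy move counts, enumerate all interleavings of the vertical and horizontal move characters in vertical-first order, and filter out the paths whose simulated walk crosses the blank cell; the outer Cartesian-product loop becomes a comprehension.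
import Mathlib
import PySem

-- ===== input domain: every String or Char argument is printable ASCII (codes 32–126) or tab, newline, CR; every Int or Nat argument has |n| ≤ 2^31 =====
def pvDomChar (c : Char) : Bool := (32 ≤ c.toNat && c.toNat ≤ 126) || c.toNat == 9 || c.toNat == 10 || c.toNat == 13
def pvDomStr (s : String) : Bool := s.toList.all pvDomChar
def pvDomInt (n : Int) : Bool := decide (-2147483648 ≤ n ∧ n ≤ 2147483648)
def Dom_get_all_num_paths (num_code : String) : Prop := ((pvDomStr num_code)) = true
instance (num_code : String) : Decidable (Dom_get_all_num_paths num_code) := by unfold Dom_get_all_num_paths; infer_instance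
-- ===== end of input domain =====

-- B replaces A's cell-by-cell DFS with a closed-form move count + interleaving enumeration
-- and a post-hoc blank-cell filter (objective: alternative decomposition, same cost).

-- ===== PORT A =====
def pvKeypad : List (List Char) :=
  [['7', '8', '9'], ['4', '5', '6'], ['1', '2', '3'], [' ', '0', 'A']]

def pvCell (x y : Nat) : Char := ((pvKeypad.getD x []).getD y ' ')

-- the double enumerate scan of get_paths: records start and end coordinates
def pvScan (start_key end_key : Char) : Option (Nat × Nat) × Option (Nat × Nat) :=
  pvKeypad.zipIdx.foldl (fun acc (p : List Char × Nat) =>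
    p.1.zipIdx.foldl (fun acc2 (q : Char × Nat) =>
      if q.1 == start_key then (some (p.2, q.2), acc2.2)
      else if q.1 == end_key then (acc2.1, some (p.2, q.2))
      else acc2) acc) (none, none)

-- literal port of get_paths; fuel only makes the recursion total (12 always suffices on the keypad,
-- and inputs on which Python raises NameError are outside Pre_)
def pvGetPathsA : Nat → Char → Char → List (List Char)
  | 0, _, _ => []
  | fuel + 1, start_key, end_key =>
    if start_key == end_key then [[]]
    else
      match pvScan start_key end_key with
      | (some (sx, sy), some (ex, ey)) =>
        let vert :=
          if sx < ex then
            if pvCell (sx + 1) sy != ' ' then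
              (pvGetPathsA fuel (pvCell (sx + 1) sy) (pvCell ex ey)).map (fun i => 'v' :: i)
            else []
          else if ex < sx then
            if pvCell (sx - 1) sy != ' ' then
              (pvGetPathsA fuel (pvCell (sx - 1) sy) (pvCell ex ey)).map (fun i => '^' :: i)
            else []
          else []
        let horiz :=
          if sy < ey then
            if pvCell sx (sy + 1) != ' ' then
              (pvGetPathsA fuel (pvCell sx (sy + 1)) (pvCell ex ey)).map (fun i => '>' :: i)
            else []
          else if ey < sy then
            if pvCell sx (sy - 1) != ' ' then
              (pvGetPathsA fuel (pvCell sx (sy - 1)) (pvCell ex ey)).map (fun i => '<' :: i)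
            else []
          else []
        vert ++ horiz
      | _ => []

def get_all_num_paths (num_code : String) : List String :=
  ((num_code.toList.foldl (fun (st : List (List Char) × Char) num_key =>
    let paths_to_key := pvGetPathsA 12 st.2 num_key
    let new_paths := st.1.foldl (fun acc prev_paths =>
      paths_to_key.foldl (fun acc2 add_path => acc2 ++ [prev_paths ++ add_path ++ ['A']]) acc) []
    (new_paths, num_key)) ([[]], 'A')).1).map String.ofList

-- ===== PORT B =====
-- first position of key on the keypad, as Int coordinates
def pvPosB (key : Char) : Option (Int × Int) :=
  pvKeypad.zipIdx.findSome? (fun p =>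
    p.1.zipIdx.findSome? (fun q =>
      if q.1 == key then some ((p.2 : Int), (q.2 : Int)) else none))

-- all strings with a copies of ca and b copies of cb, ca-first (DFS) order
-- fuel = a + b only makes the recursion structural; it always suffices
def pvInterleaveGo : Nat → Nat → Nat → Char → Char → List (List Char)
  | _, 0, 0, _, _ => [[]]
  | 0, _, _, _, _ => [[]]
  | f + 1, a, b, ca, cb =>
    (match a with
     | 0 => []
     | a' + 1 => (pvInterleaveGo f a' b ca cb).map (fun s => ca :: s)) ++
    (match b with
     | 0 => []
     | b' + 1 => (pvInterleaveGo f a b' ca cb).map (fun s => cb :: s))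

def pvInterleave (a b : Nat) (ca cb : Char) : List (List Char) :=
  pvInterleaveGo (a + b) a b ca cb

def pvCellB (x y : Int) : Char :=
  if 0 ≤ x ∧ x < 4 ∧ 0 ≤ y ∧ y < 3 then pvCell x.toNat y.toNat else ' '

def pvWalkOk : Int → Int → List Char → Bool
  | _, _, [] => true
  | x, y, c :: rest =>
    let xy : Int × Int :=
      if c == 'v' then (x + 1, y)
      else if c == '^' then (x - 1, y)
      else if c == '>' then (x, y + 1)
      else (x, y - 1)
    if pvCellB xy.1 xy.2 == ' ' then false else pvWalkOk xy.1 xy.2 rest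

def pvDirectPaths (start_key end_key : Char) : List (List Char) :=
  if start_key == end_key then [[]]
  else
    match pvPosB start_key, pvPosB end_key with
    | some (sx, sy), some (ex, ey) =>
      let dx := ex - sx
      let dy := ey - sy
      let vc := if dx > 0 then 'v' else '^'
      let hc := if dy > 0 then '>' else '<'
      (pvInterleave dx.natAbs dy.natAbs vc hc).filter (fun p => pvWalkOk sx sy p)
    | _, _ => []

def get_all_num_paths_alt (num_code : String) : List String :=
  ((num_code.toList.foldl (fun (st : List (List Char) × Char) key =>
    let segs := pvDirectPaths st.2 key
    (st.1.flatMap (fun p => segs.map (fun s => p ++ s ++ ['A'])), key)) ([[]], 'A')).1).map String.ofList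

-- ===== PRECONDITION & SPEC =====
def pvKeys : List Char := ['0', '1', '2', '3', '4', '5', '6', '7', '8', '9', 'A', ' ']

-- Pre_ excludes exactly the strings containing a character absent from the numeric keypad,
-- on which Python A raises NameError/UnboundLocalError inside get_paths.
def Pre_get_all_num_paths (num_code : String) : Prop :=
  num_code.toList.all (fun c => c ∈ pvKeys) = true
instance (num_code : String) : Decidable (Pre_get_all_num_paths num_code) := by
  unfold Pre_get_all_num_paths; infer_instance

def pvWitness_get_all_num_paths : String := "029A"

def Spec_get_all_num_paths (num_code : String) (out : List String) : Prop := out = get_all_num_paths_alt num_code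
instance (num_code : String) (out : List String) : Decidable (Spec_get_all_num_paths num_code out) := by unfold Spec_get_all_num_paths; infer_instance

-- ===== CLAIM (what is proved, stated in full; the proofs are below) =====
def Claim_equal_get_all_num_paths : Prop := ∀ (num_code : String), Dom_get_all_num_paths num_code → Pre_get_all_num_paths num_code → Spec_get_all_num_paths num_code (get_all_num_paths num_code)

-- ===== LEMMAS AND PROOFS =====

-- the two path generators agree on every pair of keypad keys (144 finite cases)
theorem pv_paths_agree :
    (pvKeys.all fun s => pvKeys.all fun e =>
      pvGetPathsA 12 s e == pvDirectPaths s e) = true := by decide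

theorem pv_paths_agree' {s e : Char} (hs : s ∈ pvKeys) (he : e ∈ pvKeys) :
    pvGetPathsA 12 s e = pvDirectPaths s e := by
  have h := pv_paths_agree
  rw [List.all_eq_true] at h
  have h2 := h s hs
  rw [List.all_eq_true] at h2
  exact beq_iff_eq.mp (h2 e he)

-- A's nested append loop is B's flatMap/map comprehension
theorem pv_inner_loop (segs : List (List Char)) (g : List Char → List Char) (acc : List (List Char)) :
    segs.foldl (fun a2 s => a2 ++ [g s]) acc = acc ++ segs.map g := by
  induction segs generalizing acc with
  | nil => simp
  | cons s rest ih => simp [List.foldl_cons, ih, List.append_assoc]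

theorem pv_outer_loop (paths segs : List (List Char)) (acc : List (List Char)) :
    paths.foldl (fun acc p => segs.foldl (fun a2 s => a2 ++ [p ++ s ++ ['A']]) acc) acc
      = acc ++ paths.flatMap (fun p => segs.map (fun s => p ++ s ++ ['A'])) := by
  induction paths generalizing acc with
  | nil => simp
  | cons p rest ih =>
    simp only [List.foldl_cons]
    rw [pv_inner_loop, ih, List.flatMap_cons, List.append_assoc]

theorem pv_fold_agree (cs : List Char) (paths : List (List Char)) (prev : Char)
    (hp : prev ∈ pvKeys) (hcs : ∀ c ∈ cs, c ∈ pvKeys) :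
    (cs.foldl (fun (st : List (List Char) × Char) num_key =>
      let paths_to_key := pvGetPathsA 12 st.2 num_key
      let new_paths := st.1.foldl (fun acc prev_paths =>
        paths_to_key.foldl (fun acc2 add_path => acc2 ++ [prev_paths ++ add_path ++ ['A']]) acc) []
      (new_paths, num_key)) (paths, prev)).1
    = (cs.foldl (fun (st : List (List Char) × Char) key =>
        let segs := pvDirectPaths st.2 key
        (st.1.flatMap (fun p => segs.map (fun s => p ++ s ++ ['A'])), key)) (paths, prev)).1 := by
  induction cs generalizing paths prev with
  | nil => rfl
  | cons c rest ih =>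
    have hc : c ∈ pvKeys := hcs c (List.mem_cons_self ..)
    simp only [List.foldl_cons]
    rw [show (pvGetPathsA 12 prev c) = pvDirectPaths prev c from pv_paths_agree' hp hc]
    rw [pv_outer_loop]
    simp only [List.nil_append]
    exact ih _ c hc (fun d hd => hcs d (List.mem_cons_of_mem _ hd))

-- ===== VERDICT (by name: the statement is the Claim_ definition above) =====
theorem get_all_num_paths_spec : Claim_equal_get_all_num_paths := by
  intro num_code _ hpre
  unfold Spec_get_all_num_paths get_all_num_paths get_all_num_paths_alt
  unfold Pre_get_all_num_paths at hpre
  rw [List.all_eq_true] at hpre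
  rw [pv_fold_agree num_code.toList [[]] 'A' (by decide) (fun c hc => by
    simpa using hpre c hc)]
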